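-- pv_equiv track=rewrite | github.com/takeweb/utility_apps | tools/base_converter.py | convert_binary_4digit_grouping
-- ===== SOURCE A (Python) =====
-- def convert_binary_4digit_grouping(binary_raw):
--     # 先頭の「0b」を除去
--     binary_without_prefix = binary_raw[2:]
--
--     # 4桁区切りにフォーマット
--     formatted_binary = " ".join(
--         [
--             binary_without_prefix[i : i + 4]
--             for i in range(0, len(binary_without_prefix), 4)
--         ]
--     )
--
--     # 先頭に「0b」を再追加
--     binary_output = "0b" + formatted_binary
--
--     return binary_output
-- ===== SOURCE B (Python) =====
-- def convert_binary_4digit_grouping(binary_raw):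
--     # Single left-to-right pass with a modular position counter:
--     # a space is emitted before each character at a nonzero multiple of 4.
--     body = binary_raw[2:]
--     out = []
--     k = 0
--     for ch in body:
--         if k != 0 and k % 4 == 0:
--             out.append(" ")
--         out.append(ch)
--         k += 1
--     return "0b" + "".join(out)
-- ===== Notes on version B (the rewrite author's own statement) =====
-- stated objective: alternative
-- what changed: Replaces the list of 4-char slices joined with a space separator by a single character-by-character pass that inserts the separator inline whenever a modular position counter hits a nonzero multiple of 4; no list of group substrings is ever built.
import Mathlib
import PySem

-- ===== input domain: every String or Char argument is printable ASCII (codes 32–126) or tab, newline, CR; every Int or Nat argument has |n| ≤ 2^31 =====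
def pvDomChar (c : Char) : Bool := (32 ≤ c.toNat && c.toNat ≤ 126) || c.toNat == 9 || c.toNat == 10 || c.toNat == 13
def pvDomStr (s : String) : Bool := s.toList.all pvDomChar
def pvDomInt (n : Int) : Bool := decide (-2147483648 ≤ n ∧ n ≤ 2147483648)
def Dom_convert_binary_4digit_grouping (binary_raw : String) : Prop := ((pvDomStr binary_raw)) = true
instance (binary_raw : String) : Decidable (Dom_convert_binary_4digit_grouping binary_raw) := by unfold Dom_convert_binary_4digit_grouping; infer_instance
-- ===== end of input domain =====

-- B formats by one character walk with a modular counter instead of A's list of 4-char slices; alternative decomposition, same cost.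

-- ===== PORT A =====
-- A: strip two chars, build the list of 4-char slices over range(0, len, 4), join with " ", re-prepend "0b".
def convert_binary_4digit_grouping (binary_raw : String) : String :=
  let body := PySem.List.slice binary_raw.toList (some 2) none
  let groups := (PySem.List.pyRange 0 (body.length : Int) 4).map
      (fun i => PySem.List.slice body (some i) (some (i + 4)))
  String.ofList ("0b".toList ++ PySem.Chars.join [' '] groups)

-- ===== PORT B =====
-- B: fold over the characters with state (output buffer, position counter), space before nonzero multiples of 4.
def pvBStep (st : List Char × Nat) (ch : Char) : List Char × Nat :=
  ((if st.2 ≠ 0 ∧ st.2 % 4 = 0 then st.1 ++ [' '] else st.1) ++ [ch], st.2 + 1)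

def convert_binary_4digit_grouping_alt (binary_raw : String) : String :=
  let body := PySem.List.slice binary_raw.toList (some 2) none
  String.ofList ("0b".toList ++ (body.foldl pvBStep ([], 0)).1)

-- ===== PRECONDITION & SPEC =====
def Spec_convert_binary_4digit_grouping (binary_raw : String) (out : String) : Prop := out = convert_binary_4digit_grouping_alt binary_raw
instance (binary_raw : String) (out : String) : Decidable (Spec_convert_binary_4digit_grouping binary_raw out) := by unfold Spec_convert_binary_4digit_grouping; infer_instance

-- ===== CLAIM (what is proved, stated in full; the proofs are below) =====
def Claim_equal_convert_binary_4digit_grouping : Prop := ∀ (binary_raw : String), Dom_convert_binary_4digit_grouping binary_raw → Spec_convert_binary_4digit_grouping binary_raw (convert_binary_4digit_grouping binary_raw)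

-- ===== LEMMAS AND PROOFS =====

-- B's emitted suffix, as a recursive function of the remaining characters and the counter.
def pvGrp : List Char → Nat → List Char
  | [], _ => []
  | c :: rest, k => (if k ≠ 0 ∧ k % 4 = 0 then [' ', c] else [c]) ++ pvGrp rest (k + 1)

theorem pvB_foldl (cs : List Char) : ∀ (acc : List Char) (k : Nat),
    (cs.foldl pvBStep (acc, k)).1 = acc ++ pvGrp cs k := by
  induction cs with
  | nil => intro acc k; simp [pvGrp]
  | cons c rest ih =>
      intro acc k
      simp only [List.foldl_cons, pvBStep, pvGrp, ih]
      split_ifs <;> simp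

theorem pvGrp_shift (cs : List Char) : ∀ k : Nat, 0 < k → pvGrp cs (k + 4) = pvGrp cs k := by
  induction cs with
  | nil => intro k _; rfl
  | cons c rest ih =>
      intro k hk
      have h4 : (k + 4) % 4 = k % 4 := Nat.add_mod_right k 4
      have hc : (k + 4 ≠ 0 ∧ (k + 4) % 4 = 0) ↔ (k ≠ 0 ∧ k % 4 = 0) := by
        constructor <;> intro h <;> exact ⟨by omega, by omega⟩
      simp only [pvGrp, hc]
      rw [show k + 4 + 1 = (k + 1) + 4 by omega, ih (k + 1) (by omega)]

theorem pvGrp_four (cs : List Char) (h : cs ≠ []) : pvGrp cs 4 = ' ' :: pvGrp cs 0 := by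
  cases cs with
  | nil => exact absurd rfl h
  | cons c rest =>
      simp only [pvGrp]
      rw [show (4 : Nat) + 1 = 1 + 4 by omega, pvGrp_shift rest 1 (by omega)]
      simp

theorem pvGrp_id_aux (cs : List Char) : ∀ k : Nat, 0 < k → cs.length + k ≤ 4 → pvGrp cs k = cs := by
  induction cs with
  | nil => intro k _ _; rfl
  | cons c rest ih =>
      intro k hk hle
      have : k % 4 ≠ 0 := by
        have : k < 4 := by simp at hle; omega
        omega
      simp only [pvGrp, this, and_false, if_false]
      rw [ih (k + 1) (by omega) (by simp at hle ⊢; omega)]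
      simp

theorem pvGrp_id (cs : List Char) (h : cs.length ≤ 4) : pvGrp cs 0 = cs := by
  cases cs with
  | nil => rfl
  | cons c rest =>
      simp only [pvGrp]
      rw [pvGrp_id_aux rest 1 (by omega) (by simp at h ⊢; omega)]
      simp

theorem pvGrp_chunk (cs : List Char) (h : 4 < cs.length) :
    pvGrp cs 0 = cs.take 4 ++ ' ' :: pvGrp (cs.drop 4) 0 := by
  match cs with
  | a :: b :: c :: d :: rest =>
      have hr : rest ≠ [] := by simp at h; exact List.ne_nil_of_length_pos (by omega)
      simp only [pvGrp, pvGrp_four rest hr]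
      simp

-- intercalate steps
theorem pv_intercalate_cons₂ (s x y : List Char) (zs : List (List Char)) :
    List.intercalate s (x :: y :: zs) = x ++ s ++ List.intercalate s (y :: zs) := by
  simp [List.intercalate, List.intersperse]

-- core: intercalating the 4-chunks with a space equals the counter walk
theorem pvA_aux : ∀ (L : Nat) (cs : List Char), cs.length = L →
    List.intercalate [' '] ((List.range ((L + 3) / 4)).map
      (fun k => (cs.drop (4 * k)).take 4)) = pvGrp cs 0 := by
  intro L
  induction L using Nat.strong_induction_on with
  | _ L ih =>
    intro cs hL
    by_cases h0 : L = 0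
    · subst h0
      rw [List.eq_nil_of_length_eq_zero hL]
      simp [pvGrp, List.intercalate]
    · by_cases hle : L ≤ 4
      · have hm : (L + 3) / 4 = 1 := by omega
        rw [hm]
        simp only [List.range_one, List.map_cons, List.map_nil, Nat.mul_zero, List.drop_zero]
        rw [List.take_of_length_le (by omega), pvGrp_id cs (by omega)]
        simp [List.intercalate]
      · have hm : (L + 3) / 4 = ((L - 4) + 3) / 4 + 1 := by omega
        rw [hm, List.range_succ_eq_map]
        simp only [List.map_cons, List.map_map, Nat.mul_zero, List.drop_zero]
        have htail : (List.range ((L - 4 + 3) / 4)).map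
            ((fun k => (cs.drop (4 * k)).take 4) ∘ Nat.succ)
            = (List.range ((L - 4 + 3) / 4)).map (fun k => ((cs.drop 4).drop (4 * k)).take 4) := by
          apply List.map_congr_left
          intro k _
          simp only [Function.comp, List.drop_drop]
          rw [show 4 + 4 * k = 4 * (k + 1) by ring]
        rw [htail]
        have hIH := ih (L - 4) (by omega) (cs.drop 4) (by simp [hL])
        have hm1 : 1 ≤ (L - 4 + 3) / 4 := by omega
        cases hlist : (List.range ((L - 4 + 3) / 4)).map
            (fun k => ((cs.drop 4).drop (4 * k)).take 4) with
        | nil =>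
            exfalso
            have := congrArg List.length hlist
            simp at this
            omega
        | cons y zs =>
            rw [pv_intercalate_cons₂, ← hlist, hIH,
              pvGrp_chunk cs (by omega), List.append_assoc]
            simp

-- A's formatted body equals pvGrp cs 0.
theorem pvA_eq_pvGrp (cs : List Char) :
    PySem.Chars.join [' '] ((PySem.List.pyRange 0 (cs.length : Int) 4).map
      (fun i => PySem.List.slice cs (some i) (some (i + 4)))) = pvGrp cs 0 := by
  rw [PySem.List.pyRange_of_pos 0 (cs.length : Int) (by norm_num)]
  have hm : (if (0:Int) < (cs.length : Int) then (((cs.length : Int) - 0 + 4 - 1) / 4).toNat else 0)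
      = (cs.length + 3) / 4 := by
    split_ifs with h <;> omega
  rw [hm, List.map_map,
    show PySem.Chars.join [' '] = List.intercalate [' '] from rfl,
    List.map_congr_left (fun (k : Nat) (_ : k ∈ List.range ((cs.length + 3) / 4)) => by
      show PySem.List.slice cs (some ((0:Int) + 4 * (k:Int))) (some ((0:Int) + 4 * (k:Int) + 4))
          = (cs.drop (4 * k)).take 4
      rw [show (0:Int) + 4 * (k:Int) = ((4 * k : Nat) : Int) by push_cast; ring,
        show ((4 * k : Nat) : Int) + 4 = ((4 * k + 4 : Nat) : Int) by push_cast; ring,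
        PySem.List.slice_natCast]
      congr 1
      omega)]
  exact pvA_aux cs.length cs rfl

-- ===== VERDICT (by name: the statement is the Claim_ definition above) =====
theorem convert_binary_4digit_grouping_spec : Claim_equal_convert_binary_4digit_grouping := by
  intro s _
  unfold Spec_convert_binary_4digit_grouping convert_binary_4digit_grouping convert_binary_4digit_grouping_alt
  simp only [pvB_foldl, List.nil_append, pvA_eq_pvGrp]
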